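-- pv_equiv track=rewrite | github.com/keejkrej/gixd-gixos-langmuir | plot_gixd.py | extract_index_from_filename
-- ===== SOURCE A (Python) =====
-- def extract_index_from_filename(filename_or_varname: str):
--     """Extract index from filename by finding the first number."""
--     # Split by common separators and look for numeric parts
--     parts = filename_or_varname.split("_")
--     for part in parts:
--         if part.isdigit():
--             return int(part)
--
--     # If no underscore-separated numbers, extract digits from any part
--     for part in parts:
--         digits = "".join(c for c in part if c.isdigit())
--         if digits:
--             return int(digits)
--
--     return None
-- ===== SOURCE B (Python) =====
-- def extract_index_from_filename(filename_or_varname: str):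
--     """Extract index from filename by finding the first number (single pass)."""
--     fallback = None
--     for part in filename_or_varname.split("_"):
--         if part.isdigit():
--             return int(part)
--         if fallback is None:
--             digits = "".join(c for c in part if c.isdigit())
--             if digits:
--                 fallback = int(digits)
--     return fallback
-- ===== Notes on version B (the rewrite author's own statement) =====
-- stated objective: simpler
-- what changed: Replaces A's two sequential passes over the split parts with one pass that returns the first fully-numeric token immediately and lazily remembers the first partial-digits token as a fallback.
import Mathlib
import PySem

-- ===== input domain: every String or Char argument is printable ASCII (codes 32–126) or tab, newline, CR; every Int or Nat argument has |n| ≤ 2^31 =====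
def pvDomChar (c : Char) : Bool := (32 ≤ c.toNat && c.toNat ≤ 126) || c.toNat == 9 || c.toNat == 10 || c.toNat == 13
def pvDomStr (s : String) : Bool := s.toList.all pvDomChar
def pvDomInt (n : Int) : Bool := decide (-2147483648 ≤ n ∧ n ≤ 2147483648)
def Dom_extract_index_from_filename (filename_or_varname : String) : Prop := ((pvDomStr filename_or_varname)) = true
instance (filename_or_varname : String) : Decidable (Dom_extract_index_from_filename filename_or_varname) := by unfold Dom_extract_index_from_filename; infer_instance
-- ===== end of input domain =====

-- B makes one pass over the split parts instead of A's two sequential passes (simpler; same return values).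


-- ===== PORT A =====
-- first loop of A: 'some r' means "A returned here with value r"
-- (r itself is Option Int: Python returns an int; a ValueError of int() would be 'some none' — unreachable, the part is all digits)
def pvALoop1 : List String → Option (Option Int)
  | [] => none
  | p :: rest =>
    if PySem.Str.strIsdigit p then some (PySem.Int.ofStr? p) else pvALoop1 rest

-- second loop of A: digits = "".join(c for c in part if c.isdigit()); if digits: return int(digits)
def pvALoop2 : List String → Option (Option Int)
  | [] => none
  | p :: rest =>
    let digits := String.ofList (p.toList.filter PySem.Chars.isdigit)
    if digits.toList.isEmpty then pvALoop2 rest else some (PySem.Int.ofStr? digits)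

def extract_index_from_filename (filename_or_varname : String) : Option Int :=
  let parts := (PySem.Str.split? filename_or_varname "_").getD []
  match pvALoop1 parts with
  | some r => r
  | none =>
    match pvALoop2 parts with
    | some r => r
    | none => none

-- ===== PORT B =====
-- single pass; fb = the fallback: 'none' = Python's fallback is None (unset),
-- 'some v' = fallback was set from the first digit-bearing part (v = int(digits); 'none' would be a ValueError — unreachable)
def pvBLoop : List String → Option (Option Int) → Option Int
  | [], fb => match fb with | some v => v | none => none
  | p :: rest, fb =>
    if PySem.Str.strIsdigit p then PySem.Int.ofStr? p
    else
      match fb with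
      | some v => pvBLoop rest (some v)
      | none =>
        let digits := String.ofList (p.toList.filter PySem.Chars.isdigit)
        pvBLoop rest (if digits.toList.isEmpty then none else some (PySem.Int.ofStr? digits))

def extract_index_from_filename_alt (filename_or_varname : String) : Option Int :=
  pvBLoop ((PySem.Str.split? filename_or_varname "_").getD []) none

-- ===== PRECONDITION & SPEC =====
def Spec_extract_index_from_filename (filename_or_varname : String) (out : Option Int) : Prop := out = extract_index_from_filename_alt filename_or_varname
instance (filename_or_varname : String) (out : Option Int) : Decidable (Spec_extract_index_from_filename filename_or_varname out) := by unfold Spec_extract_index_from_filename; infer_instance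

-- ===== CLAIM (what is proved, stated in full; the proofs are below) =====
def Claim_equal_extract_index_from_filename : Prop := ∀ (filename_or_varname : String), Dom_extract_index_from_filename filename_or_varname → Spec_extract_index_from_filename filename_or_varname (extract_index_from_filename filename_or_varname)

-- ===== LEMMAS AND PROOFS =====

-- B's single pass equals: A's first loop, else the fallback if set, else A's second loop.
theorem pvBLoop_eq (parts : List String) (fb : Option (Option Int)) :
    pvBLoop parts fb =
      match pvALoop1 parts with
      | some r => r
      | none =>
        match fb with
        | some v => v
        | none => match pvALoop2 parts with | some r => r | none => none := by
  induction parts generalizing fb with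
  | nil => cases fb <;> rfl
  | cons p rest ih =>
    simp only [pvBLoop, pvALoop1, pvALoop2]
    by_cases hd : PySem.Chars.strIsdigit p.toList
    · simp [PySem.Str.strIsdigit, hd]
    · simp only [PySem.Str.strIsdigit, hd]
      cases fb with
      | some v => simp [ih]
      | none =>
        simp only [ih]
        split_ifs <;> simp

-- ===== VERDICT (by name: the statement is the Claim_ definition above) =====
theorem extract_index_from_filename_spec : Claim_equal_extract_index_from_filename := by
  intro s _
  unfold Spec_extract_index_from_filename extract_index_from_filename extract_index_from_filename_alt
  rw [pvBLoop_eq]
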